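-- pv_equiv track=rewrite | github.com/zhansaya0812/python_labs_and_hws | LAB1/#22.py | group_by_parity_and_sort
-- ===== SOURCE A (Python) =====
-- def group_by_parity_and_sort(nums):
--     result = []
--     taq=[]
--     zhup=[]
--     for num in nums:
--         if num % 2 == 0:
--             zhup.append(num)
--         if num % 2 == 1:
--             taq.append(num)
--     taq.sort()
--     zhup.sort()
--     result=zhup+taq
--     return result
-- ===== SOURCE B (Python) =====
-- def group_by_parity_and_sort(nums):
--     # one stable keyed sort: evens (key 0) before odds (key 1), ascending within each group
--     return sorted(nums, key=lambda x: (x % 2, x))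
-- ===== Notes on version B (the rewrite author's own statement) =====
-- stated objective: simpler
-- what changed: Replaces the two-bucket partition followed by two separate sorts with a single keyed sort on the tuple (x % 2, x), which orders evens before odds and ascending within each group in one pass of sorting.
import Mathlib
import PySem

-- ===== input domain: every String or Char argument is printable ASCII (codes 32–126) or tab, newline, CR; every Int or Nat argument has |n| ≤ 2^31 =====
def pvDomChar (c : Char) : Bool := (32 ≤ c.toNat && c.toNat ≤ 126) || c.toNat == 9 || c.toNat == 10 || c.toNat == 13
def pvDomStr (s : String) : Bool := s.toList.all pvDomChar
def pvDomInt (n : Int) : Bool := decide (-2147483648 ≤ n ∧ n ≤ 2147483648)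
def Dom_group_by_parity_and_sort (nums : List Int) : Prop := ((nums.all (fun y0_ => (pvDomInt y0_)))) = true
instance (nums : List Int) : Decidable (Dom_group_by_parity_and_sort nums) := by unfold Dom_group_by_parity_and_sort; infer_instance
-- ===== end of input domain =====

-- B replaces A's two-bucket partition + two sorts by a single stable sort keyed on (x % 2, x); simpler, same asymptotics.


-- ===== PORT A =====
def group_by_parity_and_sort (nums : List Int) : List Int :=
  let st := nums.foldl (fun (st : List Int × List Int) num =>
      let st := if PySem.Int.mod num 2 == 0 then (st.1 ++ [num], st.2) else st
      if PySem.Int.mod num 2 == 1 then (st.1, st.2 ++ [num]) else st)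
    (([] : List Int), ([] : List Int))
  let taq := PySem.List.sorted st.2 (fun x => x)
  let zhup := PySem.List.sorted st.1 (fun x => x)
  zhup ++ taq

-- ===== PORT B =====
def group_by_parity_and_sort_alt (nums : List Int) : List Int :=
  PySem.List.sorted2 nums (fun x => PySem.Int.mod x 2) (fun x => x)

-- ===== PRECONDITION & SPEC =====
def Spec_group_by_parity_and_sort (nums : List Int) (out : List Int) : Prop := out = group_by_parity_and_sort_alt nums
instance (nums : List Int) (out : List Int) : Decidable (Spec_group_by_parity_and_sort nums out) := by unfold Spec_group_by_parity_and_sort; infer_instance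

-- ===== CLAIM (what is proved, stated in full; the proofs are below) =====
def Claim_equal_group_by_parity_and_sort : Prop := ∀ (nums : List Int), Dom_group_by_parity_and_sort nums → Spec_group_by_parity_and_sort nums (group_by_parity_and_sort nums)

-- ===== LEMMAS AND PROOFS =====

-- scalar encoding of the lexicographic key (x % 2, x), injective on all of Int
def pvKey (x : Int) : Int := x + 1099511627776 * (x % 2)

theorem pvKey_injective : Function.Injective pvKey := by
  intro a b h
  unfold pvKey at h
  rcases Int.emod_two_eq a with h1 | h1 <;> rcases Int.emod_two_eq b with h2 | h2 <;>
    rw [h1, h2] at h <;> omega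

theorem pvMod_eq_emod (x : Int) : PySem.Int.mod x 2 = x % 2 := by
  show Int.fmod x 2 = x % 2
  rw [Int.fmod_eq_emod]
  simp

-- insertBy congruence: the comparator only matters on the inserted element vs list elements
theorem insertBy_congr {α : Type} (f g : α → α → Bool) (x : α) (ys : List α)
    (h : ∀ y ∈ ys, f x y = g x y) :
    PySem.List.insertBy f x ys = PySem.List.insertBy g x ys := by
  induction ys with
  | nil => rfl
  | cons y ys ih =>
    simp only [PySem.List.insertBy]
    rw [h y (by simp)]
    by_cases hg : g x y = true
    · simp [hg]
    · simp [hg, ih (fun z hz => h z (by simp [hz]))]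

theorem mem_insertBy_of_mem {α : Type} (f : α → α → Bool) (x : α) (ys : List α) (z : α)
    (hz : z ∈ PySem.List.insertBy f x ys) : z = x ∨ z ∈ ys := by
  induction ys with
  | nil => simpa [PySem.List.insertBy] using hz
  | cons y ys ih =>
    simp only [PySem.List.insertBy] at hz
    by_cases hc : f x y = true
    · simp [hc] at hz ⊢; tauto
    · simp [hc] at hz ⊢
      rcases hz with rfl | h
      · tauto
      · rcases ih h with h' | h' <;> tauto

theorem foldl_insertBy_congr_aux {α : Type} (f g : α → α → Bool) (xs : List α) :
    ∀ (acc : List α), (∀ a ∈ xs, ∀ b, (b ∈ acc ∨ b ∈ xs) → f a b = g a b) →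
      xs.foldl (fun acc x => PySem.List.insertBy f x acc) acc =
      xs.foldl (fun acc x => PySem.List.insertBy g x acc) acc := by
  induction xs with
  | nil => intro acc _; rfl
  | cons x xs ih =>
    intro acc h
    simp only [List.foldl_cons]
    rw [insertBy_congr f g x acc (fun y hy => h x (by simp) y (Or.inl hy))]
    exact ih (PySem.List.insertBy g x acc) (by
      intro a ha b hb
      rcases hb with hb | hb
      · rcases mem_insertBy_of_mem g x acc b hb with rfl | hb'
        · exact h a (by simp [ha]) b (Or.inr (by simp))
        · exact h a (by simp [ha]) b (Or.inl hb')
      · exact h a (by simp [ha]) b (Or.inr (by simp [hb])))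

theorem foldl_insertBy_congr {α : Type} (f g : α → α → Bool) (xs : List α)
    (h : ∀ a ∈ xs, ∀ b ∈ xs, f a b = g a b) :
    xs.foldl (fun acc x => PySem.List.insertBy f x acc) [] =
    xs.foldl (fun acc x => PySem.List.insertBy g x acc) [] :=
  foldl_insertBy_congr_aux f g xs []
    (fun a ha b hb => h a ha b (by simpa using hb))

-- A's loop computes the two parity filters
theorem portA_eq_filters (nums : List Int) :
    group_by_parity_and_sort nums =
      PySem.List.sorted (nums.filter (fun x => x % 2 == 0)) (fun x => x) ++
      PySem.List.sorted (nums.filter (fun x => !(x % 2 == 0))) (fun x => x) := by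
  unfold group_by_parity_and_sort
  have hbody : nums.foldl (fun (st : List Int × List Int) num =>
      let st := if PySem.Int.mod num 2 == 0 then (st.1 ++ [num], st.2) else st
      if PySem.Int.mod num 2 == 1 then (st.1, st.2 ++ [num]) else st)
      (([] : List Int), ([] : List Int)) =
    nums.foldl (fun (st : List Int × List Int) num =>
      ((fun (a : List Int) (e : Int) => if e % 2 == 0 then a ++ [e] else a) st.1 num,
       (fun (a : List Int) (e : Int) => if !(e % 2 == 0) then a ++ [e] else a) st.2 num))
      (([] : List Int), ([] : List Int)) := by
    apply PySem.List.foldl_congr_mem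
    intro acc x _
    simp only [pvMod_eq_emod]
    have h2 : x % 2 = 0 ∨ x % 2 = 1 := by omega
    rcases h2 with h2 | h2 <;> simp [h2]
  rw [hbody, PySem.List.foldl_prod_mk
    (f := fun (a : List Int) (e : Int) => if e % 2 == 0 then a ++ [e] else a)
    (g := fun (a : List Int) (e : Int) => if !(e % 2 == 0) then a ++ [e] else a)]
  rw [PySem.List.foldl_append_if_eq_filter, PySem.List.foldl_append_if_eq_filter]
  simp

theorem group_by_parity_and_sort_spec : Claim_equal_group_by_parity_and_sort := by
  intro nums hdom
  unfold Spec_group_by_parity_and_sort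
  have hbound : ∀ x ∈ nums, -2147483648 ≤ x ∧ x ≤ 2147483648 := by
    intro x hx
    have := (List.all_eq_true.mp hdom) x hx
    simpa [pvDomInt] using this
  -- B's port is insertion sort with the lexicographic comparator; on the bounded
  -- elements of nums it agrees with the scalar comparator pvKey
  have hB : group_by_parity_and_sort_alt nums = PySem.List.sorted nums pvKey := by
    show nums.foldl (fun acc x => PySem.List.insertBy
        (fun a b => decide (PySem.Int.mod a 2 < PySem.Int.mod b 2) ||
          (!decide (PySem.Int.mod b 2 < PySem.Int.mod a 2) && decide (a < b))) x acc) [] = _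
    rw [PySem.List.sorted_eq_foldl_insertBy]
    apply foldl_insertBy_congr
    intro a ha b hb
    have hA := hbound a ha
    have hBb := hbound b hb
    simp only [pvMod_eq_emod, ← decide_not, ← Bool.decide_and, ← Bool.decide_or,
      decide_eq_decide]
    unfold pvKey
    rcases Int.emod_two_eq a with h1 | h1 <;> rcases Int.emod_two_eq b with h2 | h2 <;>
      rw [h1, h2] <;> omega
  rw [hB, portA_eq_filters]
  -- both sides are key-nondecreasing rearrangements of nums under the injective key pvKey
  set evens := nums.filter (fun x => x % 2 == 0) with hev
  set odds := nums.filter (fun x => !(x % 2 == 0)) with hod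
  apply PySem.List.eq_of_perm_of_pairwise_le_of_injective pvKey pvKey_injective
  · exact ((PySem.List.sorted_perm evens (fun x => x) false).append
      (PySem.List.sorted_perm odds (fun x => x) false)).trans
      ((List.filter_append_perm _ nums).trans
        (PySem.List.sorted_perm nums pvKey false).symm)
  · rw [List.pairwise_append]
    refine ⟨?_, ?_, ?_⟩
    · refine (PySem.List.sorted_pairwise evens (fun x => x)).imp_of_mem ?_
      intro a b ha hb hle
      have ha' : a % 2 = 0 := by
        have := List.of_mem_filter ((PySem.List.mem_sorted _ _ _ _).mp ha)
        simpa using this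
      have hb' : b % 2 = 0 := by
        have := List.of_mem_filter ((PySem.List.mem_sorted _ _ _ _).mp hb)
        simpa using this
      unfold pvKey; rw [ha', hb']; omega
    · refine (PySem.List.sorted_pairwise odds (fun x => x)).imp_of_mem ?_
      intro a b ha hb hle
      have ha' : a % 2 = 1 := by
        have := List.of_mem_filter ((PySem.List.mem_sorted _ _ _ _).mp ha)
        simp at this; omega
      have hb' : b % 2 = 1 := by
        have := List.of_mem_filter ((PySem.List.mem_sorted _ _ _ _).mp hb)
        simp at this; omega
      unfold pvKey; rw [ha', hb']; omega
    · intro a ha b hb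
      have ha1 := (PySem.List.mem_sorted _ _ _ _).mp ha
      have hb1 := (PySem.List.mem_sorted _ _ _ _).mp hb
      have ha' : a % 2 = 0 := by simpa using List.of_mem_filter ha1
      have hb' : b % 2 = 1 := by
        have := List.of_mem_filter hb1; simp at this; omega
      have haB := hbound a (List.mem_of_mem_filter ha1)
      have hbB := hbound b (List.mem_of_mem_filter hb1)
      unfold pvKey; rw [ha', hb']; omega
  · exact PySem.List.sorted_pairwise nums pvKey
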